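-- pv_equiv track=rewrite | github.com/Thwani47/blog-code | demo.py | make_alignment_pattern
-- ===== SOURCE A (Python) =====
-- def make_alignment_pattern(align_square_size):
--     """
--     Creates the alignment pattern of size align_square_size and returning it as
--     a 2-dimensional array of int.
--
--     Args:
--         align_square_size (int): The size of the alignment pattern to generate
--
--     Returns:
--         2D array of int: The alignment pattern
--     """
--     # TODO: implement this function.
--     # remove the following line when you add something to this function:
--     align_pattern = [[0 for _ in range(align_square_size)] for _ in range(align_square_size)]
--
--     for row in range(align_square_size):
--         align_pattern[0][row] = 1
--         align_pattern[align_square_size-1][row] = 1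
--         align_pattern[row][0] = 1
--         align_pattern[row][align_square_size-1] = 1
--
--     for row in range(2, align_square_size-2):
--         for col in range(2, align_square_size-2):
--             if (row-2) % 2 == 0 and (col - 2) % 2 == 0:
--                 align_pattern[row][col] = 1
--
--     return align_pattern
-- ===== SOURCE B (Python) =====
-- def make_alignment_pattern(align_square_size):
--     """Single-pass version: each cell's value is computed directly from its
--     coordinates (border, or even-offset interior cell), instead of building a
--     zero grid and overwriting it in two further passes."""
--     n = align_square_size
--
--     def cell(r, c):
--         if r == 0 or r == n - 1 or c == 0 or c == n - 1:
--             return 1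
--         if 2 <= r < n - 2 and 2 <= c < n - 2 and r % 2 == 0 and c % 2 == 0:
--             return 1
--         return 0
--
--     return [[cell(r, c) for c in range(n)] for r in range(n)]
-- ===== Notes on version B (the rewrite author's own statement) =====
-- stated objective: simpler
-- what changed: Replaced A's three passes (initialize an all-zero grid, overwrite the border in a loop, overwrite even-offset interior cells in a nested loop) by a single nested comprehension that computes each cell's final value directly from its coordinates.
import Mathlib
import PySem

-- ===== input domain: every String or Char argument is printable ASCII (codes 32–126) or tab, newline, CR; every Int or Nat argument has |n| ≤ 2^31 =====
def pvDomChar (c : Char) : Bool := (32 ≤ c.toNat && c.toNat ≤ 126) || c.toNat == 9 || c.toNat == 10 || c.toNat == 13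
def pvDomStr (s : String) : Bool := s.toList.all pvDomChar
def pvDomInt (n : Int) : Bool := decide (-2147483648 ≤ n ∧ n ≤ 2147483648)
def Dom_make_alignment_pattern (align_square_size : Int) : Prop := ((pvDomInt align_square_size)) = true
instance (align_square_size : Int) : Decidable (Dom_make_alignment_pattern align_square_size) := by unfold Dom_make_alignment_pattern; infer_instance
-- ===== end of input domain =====

-- B replaces A's init-zeros + border-overwrite + interior-overwrite passes by one
-- per-cell predicate applied in a single nested comprehension (objective: simpler).

-- ===== PORT A =====
-- `g[i][j] = v` on a list of lists: fetch row i, set index j, store it back.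
-- All indices A uses are nonnegative and in range whenever the loops run.
def pvSet2 (g : List (List Int)) (i j v : Int) : List (List Int) :=
  PySem.List.pySetD g i (PySem.List.pySetD (PySem.List.pyGetD g i []) j v)

def make_alignment_pattern (align_square_size : Int) : List (List Int) :=
  let g0 := (PySem.List.pyRange 0 align_square_size 1).map
      (fun _ => (PySem.List.pyRange 0 align_square_size 1).map (fun _ => (0 : Int)))
  let g1 := (PySem.List.pyRange 0 align_square_size 1).foldl
      (fun g row =>
        pvSet2 (pvSet2 (pvSet2 (pvSet2 g 0 row 1) (align_square_size - 1) row 1) row 0 1)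
          row (align_square_size - 1) 1) g0
  (PySem.List.pyRange 2 (align_square_size - 2) 1).foldl
    (fun g row =>
      (PySem.List.pyRange 2 (align_square_size - 2) 1).foldl
        (fun g col =>
          if PySem.Int.mod (row - 2) 2 = 0 ∧ PySem.Int.mod (col - 2) 2 = 0 then
            pvSet2 g row col 1
          else g) g) g1

-- ===== PORT B =====
def pvCell (n r c : Int) : Int :=
  if r = 0 ∨ r = n - 1 ∨ c = 0 ∨ c = n - 1 then 1
  else if 2 ≤ r ∧ r < n - 2 ∧ 2 ≤ c ∧ c < n - 2 ∧
      PySem.Int.mod r 2 = 0 ∧ PySem.Int.mod c 2 = 0 then 1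
  else 0

def make_alignment_pattern_alt (align_square_size : Int) : List (List Int) :=
  (PySem.List.pyRange 0 align_square_size 1).map
    (fun r => (PySem.List.pyRange 0 align_square_size 1).map
      (fun c => pvCell align_square_size r c))

-- ===== PRECONDITION & SPEC =====
def Spec_make_alignment_pattern (align_square_size : Int) (out : List (List Int)) : Prop := out = make_alignment_pattern_alt align_square_size
instance (align_square_size : Int) (out : List (List Int)) : Decidable (Spec_make_alignment_pattern align_square_size out) := by unfold Spec_make_alignment_pattern; infer_instance

-- ===== CLAIM (what is proved, stated in full; the proofs are below) =====
def Claim_equal_make_alignment_pattern : Prop := ∀ (align_square_size : Int), Dom_make_alignment_pattern align_square_size → Spec_make_alignment_pattern align_square_size (make_alignment_pattern align_square_size)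

-- ===== LEMMAS AND PROOFS =====

-- the (r,c) entry of a grid, with defaults (only used in range)
def pvCellAt (g : List (List Int)) (r c : Nat) : Int := (g.getD r []).getD c 0

-- grid shape: m rows, each of length m
def pvShape (g : List (List Int)) (m : Nat) : Prop :=
  g.length = m ∧ ∀ row ∈ g, row.length = m

theorem pvSet2_eq (g : List (List Int)) {i j : Int} (v : Int) (hi : 0 ≤ i) (hj : 0 ≤ j) :
    pvSet2 g i j v = g.set i.toNat ((g.getD i.toNat []).set j.toNat v) := by
  rw [pvSet2, PySem.List.pySetD_of_nonneg _ _ hj, PySem.List.pyGetD_of_nonneg _ _ hi,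
    PySem.List.pySetD_of_nonneg _ _ hi]

theorem pvGetD_mem {g : List (List Int)} {i : Nat} (h : i < g.length) : g.getD i [] ∈ g := by
  rw [List.getD_eq_getElem?_getD, List.getElem?_eq_getElem h]; exact List.getElem_mem h

theorem pvShape_set2 {g : List (List Int)} {m : Nat} (hg : pvShape g m)
    {i j : Int} (hi : 0 ≤ i) (him : i.toNat < m) (hj : 0 ≤ j) (v : Int) :
    pvShape (pvSet2 g i j v) m := by
  obtain ⟨hlen, hrow⟩ := hg
  rw [pvSet2_eq g v hi hj]
  refine ⟨by simp [hlen], ?_⟩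
  intro row hm
  rcases List.mem_or_eq_of_mem_set hm with h | h
  · exact hrow _ h
  · subst h; rw [List.length_set]; exact hrow _ (pvGetD_mem (by omega))

theorem pvCellAt_set2 {g : List (List Int)} {m : Nat} (hg : pvShape g m)
    {i j : Int} (hi : 0 ≤ i) (him : i.toNat < m) (hj : 0 ≤ j) (hjm : j.toNat < m)
    (v : Int) (r c : Nat) :
    pvCellAt (pvSet2 g i j v) r c = if r = i.toNat ∧ c = j.toNat then v else pvCellAt g r c := by
  obtain ⟨hlen, hrow⟩ := hg
  have hir : i.toNat < g.length := by omega
  have hjr : j.toNat < (g.getD i.toNat []).length := by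
    have := hrow _ (pvGetD_mem hir); omega
  rw [List.getD_eq_getElem?_getD] at hjr
  rw [pvSet2_eq g v hi hj]
  simp only [pvCellAt, List.getD_eq_getElem?_getD, List.getElem?_set]
  by_cases hri : r = i.toNat
  · subst hri
    rw [if_pos rfl, if_pos hir, Option.getD_some, List.getElem?_set]
    by_cases hcj : c = j.toNat
    · subst hcj
      rw [if_pos rfl, if_pos hjr, Option.getD_some, if_pos ⟨rfl, rfl⟩]
    · rw [if_neg (fun h => hcj h.symm), if_neg (by tauto)]
  · rw [if_neg (fun h => hri h.symm), if_neg (by tauto)]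

-- merging a one-write if with an accumulated any-write if
theorem pvIfOr {P Q : Prop} [Decidable P] [Decidable Q] (b : Int) :
    (if Q then (1 : Int) else if P then 1 else b) = if P ∨ Q then 1 else b := by
  split_ifs <;> first | rfl | tauto

-- which cells the border pass's step for loop variable x touches
abbrev pvT1 (n x : Int) (r c : Nat) : Prop :=
  ((r = 0 ∨ r = (n - 1).toNat) ∧ c = x.toNat) ∨ ((c = 0 ∨ c = (n - 1).toNat) ∧ r = x.toNat)

def pvStep1 (n : Int) (g : List (List Int)) (row : Int) : List (List Int) :=
  pvSet2 (pvSet2 (pvSet2 (pvSet2 g 0 row 1) (n - 1) row 1) row 0 1) row (n - 1) 1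

theorem pvPass1 (n : Int) (hn : 1 ≤ n) (l : List Int)
    (hl : ∀ x ∈ l, 0 ≤ x ∧ x < n) (g : List (List Int)) (hg : pvShape g n.toNat) :
    pvShape (l.foldl (pvStep1 n) g) n.toNat ∧
      ∀ r c : Nat, pvCellAt (l.foldl (pvStep1 n) g) r c =
        if ∃ x ∈ l, pvT1 n x r c then 1 else pvCellAt g r c := by
  induction l generalizing g with
  | nil => exact ⟨hg, fun r c => by rw [List.foldl_nil, if_neg (by simp)]⟩
  | cons x l ih =>
    have hx := hl x (by simp)
    have hx0 : (0 : Int) ≤ 0 := le_refl _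
    have hn1 : 0 ≤ n - 1 := by omega
    have hxn : x.toNat < n.toNat := by omega
    have hn1n : (n - 1).toNat < n.toNat := by omega
    have h0n : (0 : Int).toNat < n.toNat := by omega
    have hgA := pvShape_set2 hg hx0 h0n hx.1 (v := 1)
    have hgB := pvShape_set2 hgA hn1 hn1n hx.1 (v := 1)
    have hgC := pvShape_set2 hgB hx.1 hxn hx0 (v := 1)
    have hstep : pvShape (pvStep1 n g x) n.toNat := pvShape_set2 hgC hx.1 hxn hn1 (v := 1)
    obtain ⟨ihs, ihc⟩ := ih (fun y hy => hl y (by simp [hy])) (pvStep1 n g x) hstep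
    refine ⟨by rw [List.foldl_cons]; exact ihs, fun r c => ?_⟩
    have hcell : pvCellAt (pvStep1 n g x) r c =
        if pvT1 n x r c then 1 else pvCellAt g r c := by
      rw [pvStep1,
        pvCellAt_set2 hgC hx.1 hxn hn1 hn1n,
        pvCellAt_set2 hgB hx.1 hxn hx0 h0n,
        pvCellAt_set2 hgA hn1 hn1n hx.1 hxn,
        pvCellAt_set2 hg hx0 h0n hx.1 hxn]
      simp only [pvT1, Int.toNat_zero]
      split_ifs <;> first | rfl | tauto
    rw [List.foldl_cons, ihc r c, hcell, pvIfOr]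
    simp only [List.exists_mem_cons_iff]

theorem pvPass2Inner (n : Int) (l2 : List Int)
    (hl2 : ∀ x ∈ l2, 0 ≤ x ∧ x < n) (row : Int) (hrow : 0 ≤ row ∧ row < n)
    (g : List (List Int)) (hg : pvShape g n.toNat) :
    pvShape (l2.foldl (fun g col =>
        if PySem.Int.mod (row - 2) 2 = 0 ∧ PySem.Int.mod (col - 2) 2 = 0 then
          pvSet2 g row col 1 else g) g) n.toNat ∧
      ∀ r c : Nat, pvCellAt (l2.foldl (fun g col =>
          if PySem.Int.mod (row - 2) 2 = 0 ∧ PySem.Int.mod (col - 2) 2 = 0 then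
            pvSet2 g row col 1 else g) g) r c =
        if ∃ col ∈ l2, (PySem.Int.mod (row - 2) 2 = 0 ∧ PySem.Int.mod (col - 2) 2 = 0) ∧
            r = row.toNat ∧ c = col.toNat then 1 else pvCellAt g r c := by
  induction l2 generalizing g with
  | nil => exact ⟨hg, fun r c => by rw [List.foldl_nil, if_neg (by simp)]⟩
  | cons x l ih =>
    have hx := hl2 x (by simp)
    have hrn : row.toNat < n.toNat := by omega
    have hxn : x.toNat < n.toNat := by omega
    by_cases hc : PySem.Int.mod (row - 2) 2 = 0 ∧ PySem.Int.mod (x - 2) 2 = 0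
    · have hgA := pvShape_set2 hg hrow.1 hrn hx.1 (v := 1)
      obtain ⟨ihs, ihc⟩ := ih (fun y hy => hl2 y (by simp [hy])) _ hgA
      refine ⟨by rw [List.foldl_cons, if_pos hc]; exact ihs, fun r c => ?_⟩
      rw [List.foldl_cons, if_pos hc, ihc r c, pvCellAt_set2 hg hrow.1 hrn hx.1 hxn, pvIfOr]
      simp only [List.exists_mem_cons_iff]
      have heq : ((PySem.Int.mod (row - 2) 2 = 0 ∧ PySem.Int.mod (x - 2) 2 = 0) ∧
          r = row.toNat ∧ c = x.toNat) ↔ (r = row.toNat ∧ c = x.toNat) := by tauto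
      simp only [heq]
    · obtain ⟨ihs, ihc⟩ := ih (fun y hy => hl2 y (by simp [hy])) g hg
      refine ⟨by rw [List.foldl_cons, if_neg hc]; exact ihs, fun r c => ?_⟩
      rw [List.foldl_cons, if_neg hc, ihc r c]
      simp only [List.exists_mem_cons_iff]
      have heq : ((PySem.Int.mod (row - 2) 2 = 0 ∧ PySem.Int.mod (x - 2) 2 = 0) ∧
          r = row.toNat ∧ c = x.toNat) ↔ False := by tauto
      simp only [heq, false_or]

theorem pvPass2 (n : Int) (l l2 : List Int)
    (hl : ∀ x ∈ l, 0 ≤ x ∧ x < n) (hl2 : ∀ x ∈ l2, 0 ≤ x ∧ x < n)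
    (g : List (List Int)) (hg : pvShape g n.toNat) :
    pvShape (l.foldl (fun g row => l2.foldl (fun g col =>
        if PySem.Int.mod (row - 2) 2 = 0 ∧ PySem.Int.mod (col - 2) 2 = 0 then
          pvSet2 g row col 1 else g) g) g) n.toNat ∧
      ∀ r c : Nat, pvCellAt (l.foldl (fun g row => l2.foldl (fun g col =>
          if PySem.Int.mod (row - 2) 2 = 0 ∧ PySem.Int.mod (col - 2) 2 = 0 then
            pvSet2 g row col 1 else g) g) g) r c =
        if ∃ row ∈ l, ∃ col ∈ l2, (PySem.Int.mod (row - 2) 2 = 0 ∧ PySem.Int.mod (col - 2) 2 = 0) ∧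
            r = row.toNat ∧ c = col.toNat then 1 else pvCellAt g r c := by
  induction l generalizing g with
  | nil => exact ⟨hg, fun r c => by rw [List.foldl_nil, if_neg (by simp)]⟩
  | cons x l ih =>
    have hx := hl x (by simp)
    obtain ⟨is1, ic1⟩ := pvPass2Inner n l2 hl2 x hx g hg
    obtain ⟨ihs, ihc⟩ := ih (fun y hy => hl y (by simp [hy])) _ is1
    refine ⟨by rw [List.foldl_cons]; exact ihs, fun r c => ?_⟩
    rw [List.foldl_cons, ihc r c, ic1 r c, pvIfOr]
    simp only [List.exists_mem_cons_iff]

-- zero grid shape and cells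
theorem pvG0_shape (n : Int) :
    pvShape ((PySem.List.pyRange 0 n 1).map
      (fun _ => (PySem.List.pyRange 0 n 1).map (fun _ => (0 : Int)))) n.toNat := by
  constructor
  · simp [PySem.List.length_pyRange_one]
  · intro row hrow
    simp only [List.mem_map] at hrow
    obtain ⟨_, _, h⟩ := hrow
    simp [← h, PySem.List.length_pyRange_one]

theorem pvGetD_default_of_ge {α : Type} {xs : List α} {r : Nat} (d : α)
    (h : xs.length ≤ r) : xs.getD r d = d := by
  rw [List.getD_eq_getElem?_getD, List.getElem?_eq_none h]; rfl

theorem pvG0_cell (n : Int) (r c : Nat) :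
    pvCellAt ((PySem.List.pyRange 0 n 1).map
      (fun _ => (PySem.List.pyRange 0 n 1).map (fun _ => (0 : Int)))) r c = 0 := by
  unfold pvCellAt
  rcases lt_or_ge r ((PySem.List.pyRange 0 n 1).map
      (fun _ => (PySem.List.pyRange 0 n 1).map (fun _ => (0 : Int)))).length with h | h
  · have hm := pvGetD_mem h
    simp only [List.mem_map] at hm
    obtain ⟨_, _, he⟩ := hm
    rw [← he, List.getD_eq_getElem?_getD, List.getElem?_map]
    cases (PySem.List.pyRange 0 n 1)[c]? <;> rfl
  · rw [pvGetD_default_of_ge [] h]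
    cases c <;> rfl

theorem pvCellAt_eq_getElem (g : List (List Int)) (r c : Nat)
    (hr : r < g.length) (hc : c < g[r].length) : pvCellAt g r c = g[r][c] := by
  simp [pvCellAt, List.getD_eq_getElem?_getD, hr, hc]

-- the border-pass existential, characterised
theorem pvBorder_iff (n : Int) (hn : 1 ≤ n) (r c : Nat)
    (hr : r < n.toNat) (hc : c < n.toNat) :
    (∃ x ∈ PySem.List.pyRange 0 n 1, pvT1 n x r c) ↔
      (r = 0 ∨ r = n.toNat - 1 ∨ c = 0 ∨ c = n.toNat - 1) := by
  simp only [PySem.List.mem_pyRange_one, pvT1]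
  constructor
  · rintro ⟨x, ⟨hx0, hxn⟩, h⟩
    rcases h with ⟨h, _⟩ | ⟨h, _⟩ <;> omega
  · intro h
    rcases Classical.em (r = 0 ∨ r = n.toNat - 1) with hb | hb
    · exact ⟨(c : Int), by omega, Or.inl ⟨by omega, by omega⟩⟩
    · exact ⟨(r : Int), by omega, Or.inr ⟨by omega, by omega⟩⟩

-- the interior-pass existential, characterised
theorem pvInterior_iff (n : Int) (r c : Nat) :
    (∃ row ∈ PySem.List.pyRange 2 (n - 2) 1, ∃ col ∈ PySem.List.pyRange 2 (n - 2) 1,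
        (PySem.Int.mod (row - 2) 2 = 0 ∧ PySem.Int.mod (col - 2) 2 = 0) ∧
        r = row.toNat ∧ c = col.toNat) ↔
      (2 ≤ (r : Int) ∧ (r : Int) < n - 2 ∧ 2 ≤ (c : Int) ∧ (c : Int) < n - 2 ∧
        (r : Int) % 2 = 0 ∧ (c : Int) % 2 = 0) := by
  simp only [PySem.List.mem_pyRange_one]
  simp only [PySem.Int.mod_eq_emod_of_pos (by norm_num : (0 : Int) < 2)]
  constructor
  · rintro ⟨row, ⟨h2, hrn⟩, col, ⟨h2', hcn⟩, ⟨hm1, hm2⟩, hr, hc⟩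
    have hre : (r : Int) = row := by omega
    have hce : (c : Int) = col := by omega
    refine ⟨by omega, by omega, by omega, by omega, by omega, by omega⟩
  · rintro ⟨h1, h2, h3, h4, h5, h6⟩
    exact ⟨(r : Int), ⟨h1, h2⟩, (c : Int), ⟨h3, h4⟩, ⟨by omega, by omega⟩, by omega, by omega⟩

-- ===== VERDICT (by name: the statement is the Claim_ definition above) =====
theorem make_alignment_pattern_spec : Claim_equal_make_alignment_pattern := by
  intro n _
  unfold Spec_make_alignment_pattern
  simp only [make_alignment_pattern, make_alignment_pattern_alt]
  by_cases hn : n ≤ 0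
  · rw [PySem.List.pyRange_one_eq_nil (by omega : n ≤ 0),
      PySem.List.pyRange_one_eq_nil (by omega : n - 2 ≤ 2)]
    rfl
  · have hn1 : 1 ≤ n := by omega
    rw [show (fun (g : List (List Int)) (row : Int) =>
        pvSet2 (pvSet2 (pvSet2 (pvSet2 g 0 row 1) (n - 1) row 1) row 0 1) row (n - 1) 1) =
      pvStep1 n from rfl]
    have hg0s := pvG0_shape n
    have hlb : ∀ x ∈ PySem.List.pyRange 0 n 1, 0 ≤ x ∧ x < n := by
      intro x hx; rw [PySem.List.mem_pyRange_one] at hx; omega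
    have hli : ∀ x ∈ PySem.List.pyRange 2 (n - 2) 1, 0 ≤ x ∧ x < n := by
      intro x hx; rw [PySem.List.mem_pyRange_one] at hx; omega
    obtain ⟨h1s, h1c⟩ := pvPass1 n hn1 _ hlb _ hg0s
    obtain ⟨h2s, h2c⟩ := pvPass2 n _ _ hli hli _ h1s
    apply List.ext_getElem
    · rw [h2s.1]
      simp [PySem.List.length_pyRange_one]
    · intro r hrA hrB
      have hr : r < n.toNat := by
        simp [PySem.List.length_pyRange_one] at hrB; omega
      apply List.ext_getElem
      · have hAr := h2s.2 _ (List.getElem_mem hrA)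
        rw [hAr]
        simp [PySem.List.length_pyRange_one]
      · intro c hcA hcB
        have hc : c < n.toNat := by
          simp [PySem.List.length_pyRange_one] at hcB; omega
        rw [← pvCellAt_eq_getElem _ r c hrA hcA, h2c r c, h1c r c, pvG0_cell]
        simp only [List.getElem_map, PySem.List.getElem_pyRange_one, zero_add]
        rw [pvCell]
        simp only [pvInterior_iff n r c, pvBorder_iff n hn1 r c hr hc]
        simp only [PySem.Int.mod_eq_emod_of_pos (by norm_num : (0 : Int) < 2)]
        split_ifs <;> first | rfl | omega
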